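-- pv_equiv track=rewrite | github.com/AKorets/langconnector | text_processing.py | words_split
-- ===== SOURCE A (Python) =====
-- def xor(a1,a2):
--    if a1 and (not a2):
--        return True
--    if a2 and (not a1):
--        return True
--    return False
--
-- def words_split(txt):
--    space_symbols = [' ','\n',',',';','.','?','!',':','(',')']
--    seg_l=[]
--    seg=''
--    for i in range(0,len(txt)):
--       seg = seg+txt[i]
--       if (i+1 == len(txt)) or xor((txt[i] in space_symbols), (txt[i+1] in space_symbols)):
--         if txt[i] in space_symbols:
--              seg_type = 'space'
--         else:
--              seg_type = 'word'
--         seg_l.append({'content':seg,'type': seg_type})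
--         seg = ''
--
--    #txtmap = [ ch in space_symbols for ch in txt ]
--
--    return seg_l
-- ===== SOURCE B (Python) =====
-- def words_split(txt):
--     space_symbols = [' ', '\n', ',', ';', '.', '?', '!', ':', '(', ')']
--     res = []
--     i = 0
--     n = len(txt)
--     while i < n:
--         k = txt[i] in space_symbols
--         j = i + 1
--         while j < n and (txt[j] in space_symbols) == k:
--             j += 1
--         res.append({'content': txt[i:j], 'type': 'space' if k else 'word'})
--         i = j
--     return res
-- ===== Notes on version B (the rewrite author's own statement) =====
-- stated objective: simpler
-- what changed: Replaced A's per-character segment accumulation with xor-based lookahead boundary detection by a two-pointer run scanner that finds each maximal same-class run with an inner scan and slices it out of the string in one piece.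
import Mathlib
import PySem

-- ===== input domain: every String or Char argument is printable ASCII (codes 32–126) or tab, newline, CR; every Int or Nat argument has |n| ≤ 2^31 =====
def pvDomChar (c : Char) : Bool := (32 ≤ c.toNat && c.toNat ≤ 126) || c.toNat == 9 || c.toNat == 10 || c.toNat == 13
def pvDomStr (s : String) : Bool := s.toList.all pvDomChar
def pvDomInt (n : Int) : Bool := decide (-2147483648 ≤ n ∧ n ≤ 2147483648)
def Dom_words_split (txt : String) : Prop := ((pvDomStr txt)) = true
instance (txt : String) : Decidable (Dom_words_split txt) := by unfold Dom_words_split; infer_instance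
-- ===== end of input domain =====

-- B replaces A's char-by-char accumulation with xor lookahead by a two-pointer run scanner (simpler); return value only, neither version mutates its argument.

-- shared character class: `c in space_symbols`
def pvSpaceSymbols : List Char := [' ', '\n', ',', ';', '.', '?', '!', ':', '(', ')']
def pvIsSp (c : Char) : Bool := pvSpaceSymbols.contains c

-- ===== PORT A =====
-- A's helper `xor`
def pvXor (a1 a2 : Bool) : Bool :=
  if a1 && !a2 then true
  else if a2 && !a1 then true
  else false

-- A's indexed loop, rendered as structural recursion on the remaining characters
-- (txt[i] = head, `i+1 == len(txt)` = tail empty, txt[i+1] = head of tail), with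
-- the same state: the accumulated segment string `seg`.
def pvALoop : List Char → String → List (List (String × String))
  | [], _ => []
  | c :: rest, seg =>
    let seg' := seg ++ String.ofList [c]
    if rest.isEmpty || pvXor (pvIsSp c) (pvIsSp (rest.headD ' ')) then
      [("content", seg'), ("type", if pvIsSp c then "space" else "word")] :: pvALoop rest ""
    else
      pvALoop rest seg'

def words_split (txt : String) : List (List (String × String)) :=
  pvALoop txt.toList ""

-- ===== PORT B =====
-- B's outer while loop: take the maximal run with the same classification `k` as the
-- first character (the inner `while j < n and … == k` scan = takeWhile, advancing
-- i to j = dropWhile), emit one dict per run.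
def pvBRuns (cs : List Char) : List (List (String × String)) :=
  match cs with
  | [] => []
  | c :: rest =>
    let k := pvIsSp c
    [("content", String.ofList (c :: rest.takeWhile (fun d => pvIsSp d = k))),
     ("type", if k then "space" else "word")]
      :: pvBRuns (rest.dropWhile (fun d => pvIsSp d = k))
termination_by cs.length
decreasing_by
  simpa using Nat.lt_succ_of_le (List.length_dropWhile_le _ _)

def words_split_alt (txt : String) : List (List (String × String)) :=
  pvBRuns txt.toList

-- ===== PRECONDITION & SPEC =====
def Spec_words_split (txt : String) (out : List (List (String × String))) : Prop := out = words_split_alt txt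
instance (txt : String) (out : List (List (String × String))) : Decidable (Spec_words_split txt out) := by unfold Spec_words_split; infer_instance

-- ===== CLAIM (what is proved, stated in full; the proofs are below) =====
def Claim_equal_words_split : Prop := ∀ (txt : String), Dom_words_split txt → Spec_words_split txt (words_split txt)

-- ===== LEMMAS AND PROOFS =====

theorem pvBRuns_nil : pvBRuns [] = [] := by rw [pvBRuns.eq_def]

theorem pvBRuns_cons (c : Char) (rest : List Char) :
    pvBRuns (c :: rest) =
      [("content", String.ofList (c :: rest.takeWhile (fun d => pvIsSp d = pvIsSp c))),
       ("type", if pvIsSp c then "space" else "word")]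
        :: pvBRuns (rest.dropWhile (fun d => pvIsSp d = pvIsSp c)) := by
  rw [pvBRuns.eq_def]

theorem pvALoop_cons (c : Char) (rest : List Char) (seg : String) :
    pvALoop (c :: rest) seg =
      if rest.isEmpty || pvXor (pvIsSp c) (pvIsSp (rest.headD ' ')) then
        [("content", seg ++ String.ofList [c]),
         ("type", if pvIsSp c then "space" else "word")] :: pvALoop rest ""
      else pvALoop rest (seg ++ String.ofList [c]) := rfl

theorem pvALoop_eq (cs : List Char) :
    ∀ pre : String, cs ≠ [] →
      pvALoop cs pre =
        [("content", pre ++ String.ofList (cs.takeWhile (fun d => pvIsSp d = pvIsSp (cs.headD ' ')))),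
         ("type", if pvIsSp (cs.headD ' ') then "space" else "word")]
          :: pvBRuns (cs.dropWhile (fun d => pvIsSp d = pvIsSp (cs.headD ' '))) := by
  induction cs with
  | nil => intro _ h; exact absurd rfl h
  | cons c rest ih =>
    intro pre _
    match rest with
    | [] =>
      simp [pvALoop, pvBRuns_nil, List.takeWhile, List.dropWhile]
    | d :: rest' =>
      rw [pvALoop_cons]
      simp only [List.headD_cons, List.takeWhile_cons, List.dropWhile_cons, List.isEmpty_cons,
        Bool.false_or]
      by_cases hk : pvIsSp d = pvIsSp c
      · have hcond : pvXor (pvIsSp c) (pvIsSp ((d :: rest').headD ' ')) = false := by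
          simp only [List.headD_cons, pvXor, hk]; cases pvIsSp c <;> simp
        rw [List.headD_cons] at hcond
        rw [hcond, if_neg (by simp)]
        rw [ih (pre ++ String.ofList [c]) (by simp)]
        have hpred : (fun e => decide (pvIsSp e = pvIsSp ((d :: rest').headD ' ')))
            = (fun e => decide (pvIsSp e = pvIsSp c)) := by
          funext e; simp [hk]
        rw [hpred]
        simp only [List.headD_cons, List.takeWhile_cons, List.dropWhile_cons, hk]
        simp [String.append_assoc, ← String.ofList_append]
        exact ⟨rfl, rfl⟩
      · have hcond : pvXor (pvIsSp c) (pvIsSp d) = true := by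
          simp only [pvXor]
          cases h1 : pvIsSp c <;> cases h2 : pvIsSp d <;> simp_all
        rw [hcond, if_pos (by simp)]
        have hb : pvALoop (d :: rest') "" = pvBRuns (d :: rest') := by
          rw [ih "" (by simp), pvBRuns_cons]
          simp
        rw [hb]
        simp [hk]

-- ===== VERDICT (by name: the statement is the Claim_ definition above) =====
theorem words_split_spec : Claim_equal_words_split := by
  intro txt _
  unfold Spec_words_split words_split words_split_alt
  match h : txt.toList with
  | [] => simp [pvALoop, pvBRuns_nil]
  | c :: rest =>
    rw [pvALoop_eq (c :: rest) "" (by simp), pvBRuns_cons]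
    simp
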